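-- pv_equiv track=rewrite | github.com/afghani-iitkgp/self_practice_python | ProjectEuler/739.py | sumSummation
-- ===== SOURCE A (Python) =====
-- def sumSummation(lst):
--     if len(lst)==1:
--
--         return lst[0]
--
--     lst2=[]
--
--     for i in range(1, len(lst)):
--         if i == 1:
--             lst2.append(lst[i])
--         else:
--             lst2.append(lst[i] + lst2[-1])
--
--     return sumSummation(lst2)
-- ===== SOURCE B (Python) =====
-- def sumSummation(lst):
--     # Closed form: the repeated prefix-sum reduction is a fixed linear
--     # combination of the tail elements with ballot-number (Catalan triangle)
--     # coefficients, computed in one pass.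
--     n = len(lst)
--     if n == 1:
--         return lst[0]
--     m = n - 1
--     total = 0
--     c, cp = 1, 0  # c = C(m-1+k, k), cp = C(m-1+k, k-1)  (cp = 0 at k = 0)
--     for k in range(m):
--         total += (c - cp) * lst[m - k]
--         c, cp = c * (m + k) // (k + 1), c + cp
--     return total
-- ===== Notes on version B (the rewrite author's own statement) =====
-- stated objective: faster
-- what changed: A repeatedly replaces the list by the prefix sums of its tail until one element is left; B computes the same value in a single pass as a linear combination of the tail elements with ballot-number (Catalan-triangle) coefficients maintained multiplicatively.
import Mathlib
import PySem

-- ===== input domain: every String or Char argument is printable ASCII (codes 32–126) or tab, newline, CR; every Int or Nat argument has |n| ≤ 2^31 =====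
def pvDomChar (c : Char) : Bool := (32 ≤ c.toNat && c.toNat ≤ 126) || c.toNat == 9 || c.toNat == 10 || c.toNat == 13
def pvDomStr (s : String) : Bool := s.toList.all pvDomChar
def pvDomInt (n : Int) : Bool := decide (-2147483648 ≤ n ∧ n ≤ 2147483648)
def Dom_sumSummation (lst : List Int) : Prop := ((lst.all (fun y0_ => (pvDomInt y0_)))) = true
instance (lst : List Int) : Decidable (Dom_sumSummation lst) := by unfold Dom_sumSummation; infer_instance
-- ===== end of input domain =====

-- B replaces A's quadratic repeated prefix-sum recursion by a single pass that
-- combines the tail elements with ballot-number (Catalan-triangle) coefficients.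


-- ===== PORT A =====
-- the 'for i in range(1, len(lst))' loop that builds lst2
def pfxLoop (lst : List Int) : List Int :=
  (PySem.List.pyRange 1 (lst.length : Int) 1).foldl
    (fun lst2 i =>
      if i == 1 then lst2 ++ [PySem.List.pyGetD lst i 0]
      else lst2 ++ [PySem.List.pyGetD lst i 0 + PySem.List.pyGetD lst2 (-1) 0]) []

-- needed by sumSummation's termination proof (cited in decreasing_by)
theorem pfxLoop_length_aux (is : List Int) (lst : List Int) :
    ∀ (acc : List Int),
      ((is.foldl (fun lst2 i =>
        if i == 1 then lst2 ++ [PySem.List.pyGetD lst i 0]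
        else lst2 ++ [PySem.List.pyGetD lst i 0 + PySem.List.pyGetD lst2 (-1) 0]) acc).length)
      = acc.length + is.length := by
  induction is with
  | nil => intro acc; simp
  | cons i is ih =>
    intro acc
    simp only [List.foldl_cons, List.length_cons, ih]
    split <;> simp <;> omega

theorem pfxLoop_length (lst : List Int) :
    (pfxLoop lst).length = (((lst.length : Int) - 1).toNat) := by
  unfold pfxLoop
  rw [pfxLoop_length_aux]
  simp [PySem.List.length_pyRange_one]

-- port of A: if len==1 return lst[0]; else recurse on lst2.
-- (On [] Python recurses forever until RecursionError; [] is outside Pre_;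
--  the 'length = 0 → 0' branch only makes the Lean recursion total.)
def sumSummation (lst : List Int) : Int :=
  if lst.length = 1 then PySem.List.pyGetD lst 0 0
  else if _h0 : lst.length = 0 then 0
  else sumSummation (pfxLoop lst)
termination_by lst.length
decreasing_by
  rw [pfxLoop_length]
  omega

-- ===== PORT B =====
def sumSummation_alt (lst : List Int) : Int :=
  let n : Int := lst.length
  if n == 1 then PySem.List.pyGetD lst 0 0
  else
    let m : Int := n - 1
    (((PySem.List.pyRange 0 m 1).foldl
      (fun (st : Int × Int × Int) k =>
        (st.1 + (st.2.1 - st.2.2) * PySem.List.pyGetD lst (m - k) 0,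
         PySem.Int.floordiv (st.2.1 * (m + k)) (k + 1),
         st.2.1 + st.2.2)) ((0 : Int), (1 : Int), (0 : Int))).1)

-- ===== PRECONDITION & SPEC =====
-- Pre_ excludes only the empty list, on which A recurses forever (RecursionError).
def Pre_sumSummation (lst : List Int) : Prop := lst ≠ []
instance (lst : List Int) : Decidable (Pre_sumSummation lst) := by unfold Pre_sumSummation; infer_instance
def pvWitness_sumSummation : List Int := ([1, 2, 3])

def Spec_sumSummation (lst : List Int) (out : Int) : Prop := out = sumSummation_alt lst
instance (lst : List Int) (out : Int) : Decidable (Spec_sumSummation lst out) := by unfold Spec_sumSummation; infer_instance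

-- ===== CLAIM (what is proved, stated in full; the proofs are below) =====
def Claim_equal_sumSummation : Prop := ∀ (lst : List Int), Dom_sumSummation lst → Pre_sumSummation lst → Spec_sumSummation lst (sumSummation lst)

-- ===== LEMMAS AND PROOFS =====
def Tb : Nat → Nat → Int
  | _, 0 => 1
  | r, (k+1) => ((r+k+1).choose (k+1) : Int) - ((r+k+1).choose k : Int)

theorem Tb_pascal (r k : Nat) : Tb (r+1) (k+1) = Tb (r+1) k + Tb r (k+1) := by
  cases k with
  | zero => simp [Tb]; ring
  | succ k =>
    simp only [Tb]
    have h1 : (r+1+(k+1)+1).choose (k+1+1) = (r+k+2).choose (k+1) + (r+k+2).choose (k+2) := by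
      have e : r+1+(k+1)+1 = (r+k+2)+1 := by omega
      rw [e]; exact Nat.choose_succ_succ' (r+k+2) (k+1)
    have h2 : (r+1+(k+1)+1).choose (k+1) = (r+k+2).choose k + (r+k+2).choose (k+1) := by
      have e : r+1+(k+1)+1 = (r+k+2)+1 := by omega
      rw [e]; exact Nat.choose_succ_succ' (r+k+2) k
    have h3 : r+1+k+1 = r+k+2 := by omega
    have h4 : r+(k+1)+1 = r+k+2 := by omega
    rw [h1, h2, h3, h4]
    push_cast; ring

theorem Tb_succ_self (r : Nat) : Tb r (r+1) = 0 := by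
  simp only [Tb]
  have h : (r+r+1).choose r = (r+r+1).choose (r+1) := by
    have := Nat.choose_symm (show r+1 ≤ r+r+1 by omega)
    have e : r+r+1 - (r+1) = r := by omega
    rw [e] at this
    exact this
  rw [h]; ring

theorem sum_range_ite (a b : Nat) (h : a ≤ b) (f : Nat → Int) :
    ∑ i ∈ Finset.range b, (if i < a then f i else 0) = ∑ i ∈ Finset.range a, f i := by
  rw [Finset.sum_ite, Finset.sum_const_zero, add_zero]
  congr 1
  ext i
  simp only [Finset.mem_filter, Finset.mem_range]
  omega


theorem Tb_prefix (r j : Nat) : (∑ k ∈ Finset.range (j+1), Tb r k) = Tb (r+1) j := by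
  induction j with
  | zero => simp [Tb]
  | succ j ih => rw [Finset.sum_range_succ, ih, ← Tb_pascal]

theorem ballot_sum (L : Nat) (hL : 1 ≤ L) (g : Nat → Int) :
    ∑ j ∈ Finset.range L, Tb (L-1) (L-1-j) * (∑ i ∈ Finset.range (j+2), g i)
      = ∑ i ∈ Finset.range (L+1), Tb L (L-i) * g i := by
  have h1 : ∑ j ∈ Finset.range L, Tb (L-1) (L-1-j) * (∑ i ∈ Finset.range (j+2), g i)
      = ∑ k ∈ Finset.range L, Tb (L-1) k * (∑ i ∈ Finset.range (L+1-k), g i) := by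
    rw [← Finset.sum_range_reflect (fun k => Tb (L-1) k * (∑ i ∈ Finset.range (L+1-k), g i)) L]
    apply Finset.sum_congr rfl
    intro j hj
    simp only [Finset.mem_range] at hj
    have e : L + 1 - (L - 1 - j) = j + 2 := by omega
    rw [e]
  rw [h1]
  have h2 : ∀ k ∈ Finset.range L, Tb (L-1) k * (∑ i ∈ Finset.range (L+1-k), g i)
      = ∑ i ∈ Finset.range (L+1), if k < L+1-i then Tb (L-1) k * g i else 0 := by
    intro k hk
    simp only [Finset.mem_range] at hk
    rw [Finset.mul_sum, ← sum_range_ite (L+1-k) (L+1) (by omega)]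
    apply Finset.sum_congr rfl
    intro i hi
    simp only [Finset.mem_range] at hi
    have e : i < L + 1 - k ↔ k < L + 1 - i := by omega
    simp [e]
  rw [Finset.sum_congr rfl h2, Finset.sum_comm]
  apply Finset.sum_congr rfl
  intro i hi
  simp only [Finset.mem_range] at hi
  rw [← Finset.sum_filter, ← Finset.sum_mul]
  have hfil : (Finset.range L).filter (fun k => k < L+1-i) = Finset.range (min L (L+1-i)) := by
    ext k
    simp only [Finset.mem_filter, Finset.mem_range, Finset.mem_range]
    omega
  rw [hfil]
  by_cases h0 : i = 0
  · subst h0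
    rw [show min L (L+1-0) = (L-1)+1 by omega, Tb_prefix,
        show L-1+1 = L by omega, show L-0 = L by omega]
    obtain ⟨L', rfl⟩ : ∃ L', L = L'+1 := ⟨L-1, by omega⟩
    have hp := Tb_pascal L' L'
    rw [Tb_succ_self, add_zero] at hp
    rw [show L'+1-1 = L' by omega, ← hp]
  · rw [show min L (L+1-i) = (L-i)+1 by omega, Tb_prefix, show L-1+1 = L by omega]

def pfx (s : Int) : List Int → List Int
  | [] => []
  | x :: xs => (s + x) :: pfx (s + x) xs

def CF (t : List Int) : Int :=
  ∑ i ∈ Finset.range t.length, Tb (t.length - 1) (t.length - 1 - i) * t.getD i 0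

theorem pfx_length (s : Int) (xs : List Int) : (pfx s xs).length = xs.length := by
  induction xs generalizing s with
  | nil => rfl
  | cons x xs ih => simp [pfx, ih]

theorem pfx_getD (s : Int) (xs : List Int) :
    ∀ j, j < xs.length →
      (pfx s xs).getD j 0 = s + ∑ i ∈ Finset.range (j+1), xs.getD i 0 := by
  induction xs generalizing s with
  | nil => intro j h; simp at h
  | cons x xs ih =>
    intro j h
    cases j with
    | zero => simp [pfx]
    | succ j =>
      simp only [pfx, List.getD_cons_succ]
      rw [ih (s + x) j (by simpa using h)]
      rw [Finset.sum_range_succ' (fun i => (x :: xs).getD i 0)]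
      simp [add_assoc, add_comm, add_left_comm]

theorem CF_step (x : Int) (xs : List Int) (hxs : xs ≠ []) :
    CF (pfx x xs) = CF (x :: xs) := by
  have hL : 1 ≤ xs.length := List.length_pos_iff.mpr hxs
  unfold CF
  rw [pfx_length]
  have hterm : ∀ j ∈ Finset.range xs.length,
      Tb (xs.length - 1) (xs.length - 1 - j) * (pfx x xs).getD j 0
      = Tb (xs.length - 1) (xs.length - 1 - j) * (∑ i ∈ Finset.range (j+2), (x :: xs).getD i 0) := by
    intro j hj
    simp only [Finset.mem_range] at hj
    rw [pfx_getD x xs j hj, Finset.sum_range_succ' (fun i => (x :: xs).getD i 0) (j+1)]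
    simp only [List.getD_cons_succ, List.getD_cons_zero]
    ring_nf
  rw [Finset.sum_congr rfl hterm, ballot_sum xs.length hL (fun i => (x :: xs).getD i 0)]
  simp only [List.length_cons]
  apply Finset.sum_congr rfl
  intro i hi
  congr 1

theorem loop_inv (lst : List Int) : ∀ (d j : Nat) (acc : List Int) (s : Int),
    lst.length - j ≤ d → 2 ≤ j → acc ≠ [] → PySem.List.pyGetD acc (-1) 0 = s →
    (PySem.List.pyRange (j : Int) (lst.length : Int) 1).foldl
      (fun lst2 i =>
        if i == 1 then lst2 ++ [PySem.List.pyGetD lst i 0]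
        else lst2 ++ [PySem.List.pyGetD lst i 0 + PySem.List.pyGetD lst2 (-1) 0]) acc
      = acc ++ pfx s (lst.drop j) := by
  intro d
  induction d with
  | zero =>
    intro j acc s hd hj hacc hs
    have hnj : lst.length ≤ j := by omega
    rw [PySem.List.pyRange_one_eq_nil (by exact_mod_cast hnj)]
    simp [List.drop_eq_nil_of_le hnj, pfx]
  | succ d ih =>
    intro j acc s hd hj hacc hs
    by_cases hlt : j < lst.length
    · rw [PySem.List.pyRange_one_cons (by exact_mod_cast hlt)]
      simp only [List.foldl_cons]
      have hne : ((j : Int) == 1) = false := by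
        simp; omega
      rw [hne]
      simp only [Bool.false_eq_true, if_false, hs]
      have hg : PySem.List.pyGetD lst (j : Int) 0 = lst[j] := by
        rw [PySem.List.pyGetD_natCast, List.getD_eq_getElem _ _ hlt]
      rw [hg]
      have hcast : ((j : Int) + 1) = ((j + 1 : Nat) : Int) := by push_cast; ring
      rw [hcast]
      rw [ih (j+1) (acc ++ [lst[j] + s]) (lst[j] + s) (by omega) (by omega)
        (by simp) (PySem.List.pyGetD_neg_one_append_singleton _ _ _)]
      rw [List.drop_eq_getElem_cons hlt]
      simp [pfx, add_comm]
    · have hnj : lst.length ≤ j := by omega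
      rw [PySem.List.pyRange_one_eq_nil (by exact_mod_cast hnj)]
      simp [List.drop_eq_nil_of_le hnj, pfx]

theorem pfxLoop_eq (a : Int) (t : List Int) (ht : t ≠ []) :
    pfxLoop (a :: t) = pfx 0 t := by
  obtain ⟨x, xs, rfl⟩ : ∃ x xs, t = x :: xs := by
    cases t with
    | nil => exact absurd rfl ht
    | cons x xs => exact ⟨x, xs, rfl⟩
  unfold pfxLoop
  have hn : ((a :: x :: xs).length : Int) = ((xs.length + 2 : Nat) : Int) := by simp; ring
  rw [hn, PySem.List.pyRange_one_cons (by push_cast; omega)]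
  simp only [List.foldl_cons]
  rw [show ((1 : Int) == 1) = true from rfl]
  simp only [if_true, List.nil_append]
  have hg1 : PySem.List.pyGetD (a :: x :: xs) (1 : Int) 0 = x := by
    rw [PySem.List.pyGetD_ofNat' (a :: x :: xs) 1 0]; rfl
  rw [hg1]
  have := loop_inv (a :: x :: xs) ((a :: x :: xs).length) 2 [x] x
    (by simp; omega) (by omega) (by simp) (by simp [PySem.List.pyGetD_neg_one ([x]) 0 (by simp)])
  rw [show ((1:Int)+1) = ((2:Nat):Int) by norm_num, show ((xs.length + 2 : Nat) : Int) = (((a :: x :: xs).length : Nat) : Int) by simp; ring]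
  rw [this]
  simp [pfx]

theorem sumSummation_eq_CF_aux (N : Nat) :
    ∀ (t : List Int) (a : Int), t.length ≤ N → t ≠ [] → sumSummation (a :: t) = CF t := by
  induction N with
  | zero => intro t a hN ht; cases t <;> simp_all
  | succ N ih =>
    intro t a hN ht
    obtain ⟨x, xs, rfl⟩ : ∃ x xs, t = x :: xs := by
      cases t with
      | nil => exact absurd rfl ht
      | cons x xs => exact ⟨x, xs, rfl⟩
    rw [sumSummation]
    simp only [List.length_cons, show xs.length + 1 + 1 ≠ 1 by omega,
      show xs.length + 1 + 1 ≠ 0 by omega, if_false]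
    rw [pfxLoop_eq a (x :: xs) (by simp), pfx]
    simp only [zero_add]
    cases xs with
    | nil =>
      rw [sumSummation]
      simp [pfx, CF, Tb]
    | cons y ys =>
      have hlen : (pfx x (y :: ys)).length = (y :: ys).length := pfx_length x (y :: ys)
      have hne : pfx x (y :: ys) ≠ [] := by
        intro h; rw [h] at hlen; simp at hlen
      rw [ih (pfx x (y :: ys)) x (by rw [hlen]; simp at hN ⊢; omega) hne,
        CF_step x (y :: ys) (by simp)]
      simp

theorem sumSummation_eq_CF (t : List Int) (a : Int) (ht : t ≠ []) :
    sumSummation (a :: t) = CF t :=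
  sumSummation_eq_CF_aux t.length t a le_rfl ht

theorem B_inv (a : Int) (t : List Int) (ht : t ≠ []) :
    ∀ j, j ≤ t.length →
    ((PySem.List.pyRange 0 (j : Int) 1).foldl
      (fun (st : Int × Int × Int) k =>
        (st.1 + (st.2.1 - st.2.2) * PySem.List.pyGetD (a :: t) (((t.length : Int)) - k) 0,
         PySem.Int.floordiv (st.2.1 * (((t.length : Int)) + k)) (k + 1),
         st.2.1 + st.2.2)) ((0 : Int), (1 : Int), (0 : Int)))
    = (∑ k ∈ Finset.range j, Tb (t.length - 1) k * t.getD (t.length - 1 - k) 0,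
       ((t.length - 1 + j).choose j : Int),
       if j = 0 then 0 else ((t.length - 1 + j).choose (j-1) : Int)) := by
  have hM : 1 ≤ t.length := List.length_pos_iff.mpr ht
  intro j
  induction j with
  | zero => intro _; simp [PySem.List.pyRange_one_eq_nil]
  | succ j ih =>
    intro hj
    rw [show ((j+1 : Nat) : Int) = (j : Int) + 1 by push_cast; ring,
      PySem.List.pyRange_one_succ_right (by positivity)]
    rw [List.foldl_append, ih (by omega)]
    simp only [List.foldl_cons, List.foldl_nil]
    have hjM : j < t.length := by omega
    refine Prod.ext ?_ (Prod.ext ?_ ?_)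
    · -- total component
      simp only
      rw [Finset.sum_range_succ]
      congr 1
      have hidx : ((t.length : Int)) - (j : Int) = ((t.length - j : Nat) : Int) := by
        omega
      rw [hidx, PySem.List.pyGetD_natCast]
      have hget : (a :: t).getD (t.length - j) 0 = t.getD (t.length - 1 - j) 0 := by
        have h1 : t.length - j = (t.length - 1 - j) + 1 := by omega
        rw [h1, List.getD_cons_succ]
      rw [hget]
      congr 1
      -- c_j - cp_j = Tb (M-1) j
      cases j with
      | zero => simp [Tb]
      | succ k =>
        simp only [Nat.succ_ne_zero, if_false, Tb]
        have e : t.length - 1 + (k+1) = t.length - 1 + k + 1 := by omega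
        rw [e]
        simp
    · -- c component
      simp only
      have e1 : ((t.length : Int)) + (j : Int) = ((t.length + j : Nat) : Int) := by push_cast; ring
      rw [e1]
      have hmul : ((t.length - 1 + j).choose j : Int) * ((t.length + j : Nat) : Int)
          = (((t.length + j).choose (j+1) * (j+1) : Nat) : Int) := by
        have := Nat.add_one_mul_choose_eq (t.length - 1 + j) j
        have e2 : t.length - 1 + j + 1 = t.length + j := by omega
        rw [e2] at this
        push_cast [← this]
        ring
      rw [hmul, show ((j:Int) + 1) = ((j+1 : Nat) : Int) by push_cast; ring,
        PySem.Int.floordiv_natCast]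
      rw [Nat.mul_div_cancel _ (by omega)]
      have e3 : t.length - 1 + (j+1) = t.length + j := by omega
      rw [e3]
    · -- cp component
      simp only [Nat.succ_ne_zero, if_false, Nat.add_sub_cancel]
      cases j with
      | zero => simp
      | succ k =>
        simp only [Nat.succ_ne_zero, if_false]
        have e : t.length - 1 + (k+1+1) = (t.length - 1 + (k+1)) + 1 := by omega
        rw [e, Nat.choose_succ_succ' (t.length - 1 + (k+1)) k]
        push_cast
        ring

theorem sumSummation_alt_eq_CF (t : List Int) (a : Int) (ht : t ≠ []) :
    sumSummation_alt (a :: t) = CF t := by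
  have hM : 1 ≤ t.length := List.length_pos_iff.mpr ht
  unfold sumSummation_alt
  simp only [List.length_cons]
  rw [show ((((t.length + 1 : Nat)) : Int) == 1) = false by simp; omega]
  simp only [Bool.false_eq_true, if_false]
  rw [show (((t.length + 1 : Nat) : Int)) - 1 = ((t.length : Nat) : Int) by push_cast; ring]
  rw [B_inv a t ht t.length le_rfl]
  unfold CF
  rw [← Finset.sum_range_reflect (fun i => Tb (t.length - 1) (t.length - 1 - i) * t.getD i 0) t.length]
  simp only
  apply Finset.sum_congr rfl
  intro k hk
  simp only [Finset.mem_range] at hk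
  have e : t.length - 1 - (t.length - 1 - k) = k := by omega
  rw [e]


-- ===== VERDICT (by name: the statement is the Claim_ definition above) =====
theorem sumSummation_spec : Claim_equal_sumSummation := by
  intro lst _ hpre
  unfold Spec_sumSummation
  match lst with
  | [] => exact absurd rfl hpre
  | [x] => simp [sumSummation, sumSummation_alt]
  | a :: b :: t =>
    rw [sumSummation_eq_CF (b :: t) a (by simp), sumSummation_alt_eq_CF (b :: t) a (by simp)]
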